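-- pv_equiv track=rewrite | github.com/siailya/digital-breakthrough | utils/language_detection.py | check_words_in_dict_or_startswith
-- ===== SOURCE A (Python) =====
-- import string
--
-- def check_words_in_dict_or_startswith(text: str, addresses_dict):
--     for word in text.translate(str.maketrans('', '', string.punctuation)).split(" "):
--         if word in addresses_dict:
--             return True
--
--         for dict_word in addresses_dict:
--             if dict_word.startswith(word):
--                 return True
--
--     return False
-- ===== SOURCE B (Python) =====
-- import string
--
--
-- def check_words_in_dict_or_startswith(text, addresses_dict):
--     prefixes = set()
--     for key in addresses_dict:
--         for i in range(len(key) + 1):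
--             prefixes.add(key[:i])
--     words = text.translate(str.maketrans('', '', string.punctuation)).split(" ")
--     return any(w in prefixes for w in words)
-- ===== Notes on version B (the rewrite author's own statement) =====
-- stated objective: alternative
-- what changed: Instead of scanning the whole dictionary for every word, B builds the set of all prefixes of the dictionary keys once and answers each word with a single hash-set membership test; it trades A's early exit for a precomputed index.
import Mathlib
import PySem

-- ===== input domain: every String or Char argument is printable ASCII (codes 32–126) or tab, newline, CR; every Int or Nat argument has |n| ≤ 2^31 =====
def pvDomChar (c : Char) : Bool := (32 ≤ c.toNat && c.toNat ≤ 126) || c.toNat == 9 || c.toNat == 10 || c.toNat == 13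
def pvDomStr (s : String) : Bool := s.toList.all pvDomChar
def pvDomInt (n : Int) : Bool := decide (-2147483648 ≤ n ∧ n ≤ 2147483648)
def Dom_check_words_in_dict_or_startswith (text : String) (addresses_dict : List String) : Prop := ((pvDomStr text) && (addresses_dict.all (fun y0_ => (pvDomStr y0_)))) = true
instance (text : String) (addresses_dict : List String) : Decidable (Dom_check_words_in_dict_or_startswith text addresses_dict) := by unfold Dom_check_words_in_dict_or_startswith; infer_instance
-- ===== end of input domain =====

-- B replaces A's inner scan of the whole dictionary per word by a prefix set built
-- once from the dictionary, queried per word (objective: alternative algorithm, a precomputed prefix index).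

-- ===== PORT A =====
-- string.punctuation
def pvPunct : List Char := "!\"#$%&'()*+,-./:;<=>?@[\\]^_`{|}~".toList

-- text.translate(str.maketrans('', '', string.punctuation)): delete punctuation chars
def pvStripPunct (text : String) : List Char :=
  text.toList.filter (fun c => !pvPunct.contains c)

-- A's inner loop: for dict_word in addresses_dict: if dict_word.startswith(word): return True
def pvInnerA (d : List String) (word : List Char) : Bool :=
  match d with
  | [] => false
  | k :: ks => if PySem.Chars.startswith k.toList word then true else pvInnerA ks word

-- A's outer loop over the words
def pvOuterA (ws : List (List Char)) (d : List String) : Bool :=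
  match ws with
  | [] => false
  | w :: rest =>
    if (d.map String.toList).contains w then true
    else if pvInnerA d w then true
    else pvOuterA rest d

def check_words_in_dict_or_startswith (text : String) (addresses_dict : List String) : Bool :=
  pvOuterA (PySem.Chars.splitOn (pvStripPunct text) [' ']) addresses_dict

-- ===== PORT B =====
-- {key[:i] for key in addresses_dict for i in range(len(key)+1)}
def pvPrefixSet (d : List String) : PySem.Set (List Char) :=
  d.foldl
    (fun s k =>
      (PySem.List.pyRange 0 (PySem.Str.len k + 1) 1).foldl
        (fun s i => PySem.Set.add s (PySem.Chars.slice k.toList none (some i))) s)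
    PySem.Set.empty

def check_words_in_dict_or_startswith_alt (text : String) (addresses_dict : List String) : Bool :=
  let prefixes := pvPrefixSet addresses_dict
  (PySem.Chars.splitOn (pvStripPunct text) [' ']).any
    (fun w => PySem.Set.contains prefixes w)

-- ===== PRECONDITION & SPEC =====
def Spec_check_words_in_dict_or_startswith (text : String) (addresses_dict : List String) (out : Bool) : Prop := out = check_words_in_dict_or_startswith_alt text addresses_dict
instance (text : String) (addresses_dict : List String) (out : Bool) : Decidable (Spec_check_words_in_dict_or_startswith text addresses_dict out) := by unfold Spec_check_words_in_dict_or_startswith; infer_instance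

-- ===== CLAIM (what is proved, stated in full; the proofs are below) =====
def Claim_equal_check_words_in_dict_or_startswith : Prop := ∀ (text : String) (addresses_dict : List String), Dom_check_words_in_dict_or_startswith text addresses_dict → Spec_check_words_in_dict_or_startswith text addresses_dict (check_words_in_dict_or_startswith text addresses_dict)

-- ===== LEMMAS AND PROOFS =====

-- A's inner loop is an `any`
theorem pvInnerA_eq_any (d : List String) (w : List Char) :
    pvInnerA d w = d.any (fun k => PySem.Chars.startswith k.toList w) := by
  induction d with
  | nil => rfl
  | cons k ks ih =>
    unfold pvInnerA
    split_ifs with h <;> simp [h, ih]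

-- the per-word condition A tests, as a proposition
theorem pvCondA_iff (d : List String) (w : List Char) :
    ((d.map String.toList).contains w || pvInnerA d w) = true ↔ ∃ k ∈ d, w <+: k.toList := by
  rw [pvInnerA_eq_any]
  simp only [Bool.or_eq_true, List.contains_eq_mem, List.mem_map, decide_eq_true_eq,
    List.any_eq_true, PySem.Chars.startswith_iff]
  constructor
  · rintro (⟨k, hk, rfl⟩ | ⟨k, hk, hp⟩)
    · exact ⟨k, hk, List.prefix_refl _⟩
    · exact ⟨k, hk, hp⟩
  · rintro ⟨k, hk, hp⟩
    exact Or.inr ⟨k, hk, hp⟩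

-- membership in a foldl of Set.add's
theorem mem_foldl_add {α β : Type} [BEq α] [LawfulBEq α] (l : List β) (f : β → α)
    (s : PySem.Set α) (x : α) :
    (x ∈ l.foldl (fun s b => PySem.Set.add s (f b)) s) ↔ x ∈ s ∨ ∃ b ∈ l, x = f b := by
  induction l generalizing s with
  | nil => simp
  | cons b bs ih =>
    simp only [List.foldl_cons, ih, PySem.Set.mem_add, List.mem_cons]
    constructor
    · rintro ((h | h) | h)
      · exact Or.inl h
      · exact Or.inr ⟨b, Or.inl rfl, h⟩
      · obtain ⟨c, hc, rfl⟩ := h; exact Or.inr ⟨c, Or.inr hc, rfl⟩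
    · rintro (h | ⟨c, (rfl | hc), rfl⟩)
      · exact Or.inl (Or.inl h)
      · exact Or.inl (Or.inr rfl)
      · exact Or.inr ⟨c, hc, rfl⟩

-- the prefixes of k.toList are exactly the slices k[:i], 0 ≤ i ≤ len(k)
theorem prefix_iff_slice (k : String) (w : List Char) :
    (∃ i ∈ PySem.List.pyRange 0 (PySem.Str.len k + 1) 1,
        w = PySem.Chars.slice k.toList none (some i)) ↔ w <+: k.toList := by
  constructor
  · rintro ⟨i, hi, rfl⟩
    rw [PySem.List.mem_pyRange_one] at hi
    simp only [PySem.Chars.slice_eq_listSlice, PySem.List.slice_to _ hi.1]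
    exact List.take_prefix _ _
  · intro hp
    refine ⟨(w.length : Int), ?_, ?_⟩
    · rw [PySem.List.mem_pyRange_one, PySem.Str.len_eq]
      have := hp.length_le
      omega
    · simp only [PySem.Chars.slice_eq_listSlice,
        PySem.List.slice_to _ (by positivity : (0:Int) ≤ (w.length : Int)), Int.toNat_natCast]
      exact List.prefix_iff_eq_take.mp hp

-- membership in B's prefix set
theorem mem_pvPrefixSet (d : List String) (w : List Char) :
    (w ∈ pvPrefixSet d) ↔ ∃ k ∈ d, w <+: k.toList := by
  unfold pvPrefixSet
  have aux : ∀ (d : List String) (s : PySem.Set (List Char)),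
      (w ∈ d.foldl (fun s k =>
          (PySem.List.pyRange 0 (PySem.Str.len k + 1) 1).foldl
            (fun s i => PySem.Set.add s (PySem.Chars.slice k.toList none (some i))) s) s)
        ↔ w ∈ s ∨ ∃ k ∈ d, w <+: k.toList := by
    intro d
    induction d with
    | nil => simp
    | cons k ks ih =>
      intro s
      simp only [List.foldl_cons, ih,
        mem_foldl_add (PySem.List.pyRange 0 (PySem.Str.len k + 1) 1)
          (fun i => PySem.Chars.slice k.toList none (some i)) s w,
        prefix_iff_slice, List.mem_cons]
      constructor
      · rintro ((h | h) | ⟨c, hc, hp⟩)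
        · exact Or.inl h
        · exact Or.inr ⟨k, Or.inl rfl, h⟩
        · exact Or.inr ⟨c, Or.inr hc, hp⟩
      · rintro (h | ⟨c, (rfl | hc), hp⟩)
        · exact Or.inl (Or.inl h)
        · exact Or.inl (Or.inr hp)
        · exact Or.inr ⟨c, hc, hp⟩
  rw [aux]
  have : ¬ (w ∈ PySem.Set.empty (α := List Char)) := List.not_mem_nil
  tauto

-- A's outer loop equals B's any over the same word list
theorem pvOuterA_eq_any (ws : List (List Char)) (d : List String) :
    pvOuterA ws d = ws.any (fun w => PySem.Set.contains (pvPrefixSet d) w) := by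
  induction ws with
  | nil => rfl
  | cons w rest ih =>
    have hcond : ((d.map String.toList).contains w || pvInnerA d w)
        = PySem.Set.contains (pvPrefixSet d) w := by
      rw [Bool.eq_iff_iff, pvCondA_iff, PySem.Set.contains_iff, mem_pvPrefixSet]
    simp only [pvOuterA, List.any_cons, ← ih, ← hcond]
    split_ifs with h1 h2 <;> simp_all

-- ===== VERDICT (by name: the statement is the Claim_ definition above) =====
theorem check_words_in_dict_or_startswith_spec : Claim_equal_check_words_in_dict_or_startswith := by
  intro text addresses_dict _
  unfold Spec_check_words_in_dict_or_startswith
  unfold check_words_in_dict_or_startswith check_words_in_dict_or_startswith_alt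
  rw [pvOuterA_eq_any]
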